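-- pv_equiv track=rewrite | github.com/XRFXLP/MarplePuzzle-solver | Skyscraper.py | check
-- ===== SOURCE A (Python) =====
-- def check(vector, start, final):
--     sc, Ms = 1, vector[0]
--     fc, Mf = 1, vector[6]
--     for i in range(1, 7):
--         if vector[i] > Ms:
--             sc += 1
--             Ms = vector[i]
--         if vector[6 - i] > Mf:
--             fc += 1
--             Mf = vector[6 - i]
--     if start and sc != start:        return False
--     if final and fc != final:        return False
--     return True
-- ===== SOURCE B (Python) =====
-- def check(vector, start, final):
--     week = [vector[i] for i in range(7)]
--     rev = week[::-1]
--     # a day is visible from the start iff it beats EVERY earlier day (pairwise test,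
--     # no running maximum); from the end, same test on the reversed week
--     sc = sum(all(e < w for e in week[:i]) for i, w in enumerate(week))
--     fc = sum(all(e < w for e in rev[:i]) for i, w in enumerate(rev))
--     return (not start or sc == start) and (not final or fc == final)
-- ===== Notes on version B (the rewrite author's own statement) =====
-- stated objective: alternative
-- what changed: B drops the running-maximum state entirely: it counts visible skyscrapers by the quadratic pairwise criterion 'a position is visible iff it strictly beats every earlier position', testing each element against its whole prefix slice (and the same on the reversed week for the other direction), instead of A's single interleaved loop threading two running maxima and two counters.
import Mathlib
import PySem

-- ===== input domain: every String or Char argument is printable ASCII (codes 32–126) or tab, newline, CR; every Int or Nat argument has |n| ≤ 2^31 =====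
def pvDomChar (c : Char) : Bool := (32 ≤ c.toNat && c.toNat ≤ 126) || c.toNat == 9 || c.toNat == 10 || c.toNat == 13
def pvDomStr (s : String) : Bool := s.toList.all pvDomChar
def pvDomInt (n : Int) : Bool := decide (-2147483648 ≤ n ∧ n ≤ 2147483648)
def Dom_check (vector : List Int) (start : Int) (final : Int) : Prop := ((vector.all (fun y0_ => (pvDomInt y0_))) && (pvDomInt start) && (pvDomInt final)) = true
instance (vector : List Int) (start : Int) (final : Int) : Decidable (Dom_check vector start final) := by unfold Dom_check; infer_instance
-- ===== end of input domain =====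

-- B replaces A's stateful loop (two running maxima, two counters) by the stateless
-- quadratic criterion: a position is visible iff it strictly beats every earlier
-- position, tested against its whole prefix slice (and on the reversed week for the
-- other direction); same result, different decomposition, no speed claim.

-- ===== PORT A =====
-- one step of A's loop body on a state (count, running max); g i = vector[i] (in range under Pre_)
def checkStepF (p : Int × Int) (v : Int) : Int × Int :=
  if v > p.2 then (p.1 + 1, v) else p

def check (vector : List Int) (start : Int) (final : Int) : Bool :=
  let g : Int → Int := fun i => PySem.List.pyGetD vector i 0
  let s := (PySem.List.pyRange 1 7 1).foldl
    (fun (st : (Int × Int) × (Int × Int)) i =>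
      (checkStepF st.1 (g i), checkStepF st.2 (g (6 - i))))
    ((1, g 0), (1, g 6))
  if start ≠ 0 ∧ s.1.1 ≠ start then false
  else if final ≠ 0 ∧ s.2.1 ≠ final then false
  else true

-- ===== PORT B =====
def check_alt (vector : List Int) (start : Int) (final : Int) : Bool :=
  let week := (PySem.List.pyRange 0 7 1).map (fun i => PySem.List.pyGetD vector i 0)
  let rev := week.reverse   -- week[::-1]: exact by PySem.List.slice?_none_none_neg_one
  let sc : Int :=
    ((PySem.List.enumerate week 0).countP
      (fun p => (PySem.List.slice week none (some p.1)).all (fun e => decide (e < p.2))) : Nat)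
  let fc : Int :=
    ((PySem.List.enumerate rev 0).countP
      (fun p => (PySem.List.slice rev none (some p.1)).all (fun e => decide (e < p.2))) : Nat)
  (start == 0 || sc == start) && (final == 0 || fc == final)

-- ===== PRECONDITION & SPEC =====
-- A indexes vector[0..6], raising IndexError when the list is shorter than 7 (B likewise).
def Pre_check (vector : List Int) (start : Int) (final : Int) : Prop := 7 ≤ vector.length
instance (vector : List Int) (start : Int) (final : Int) : Decidable (Pre_check vector start final) := by unfold Pre_check; infer_instance
def pvWitness_check : List Int × Int × Int := ([3, 1, 4, 1, 5, 2, 6], 4, 2)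

def Spec_check (vector : List Int) (start : Int) (final : Int) (out : Bool) : Prop := out = check_alt vector start final
instance (vector : List Int) (start : Int) (final : Int) (out : Bool) : Decidable (Spec_check vector start final out) := by unfold Spec_check; infer_instance

-- ===== CLAIM (what is proved, stated in full; the proofs are below) =====
def Claim_equal_check : Prop := ∀ (vector : List Int) (start : Int) (final : Int), Dom_check vector start final → Pre_check vector start final → Spec_check vector start final (check vector start final)

-- ===== LEMMAS AND PROOFS =====

-- A's interleaved fold computes the two independent folds componentwise
theorem foldl_pair_split (g : Int → Int) (l : List Int) (a b : Int × Int) :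
    l.foldl (fun (st : (Int × Int) × (Int × Int)) i =>
        (checkStepF st.1 (g i), checkStepF st.2 (g (6 - i)))) (a, b)
      = ((l.map g).foldl checkStepF a, (l.map (fun i => g (6 - i))).foldl checkStepF b) := by
  induction l generalizing a b with
  | nil => simp
  | cons v r ih => simp [List.foldl, ih]

-- abstract record count: seed m, +1 for each new strict running maximum
def cnt (m : Int) : List Int → Int
  | [] => 0
  | v :: r => (if m < v then 1 else 0) + cnt (max m v) r

theorem foldl_cnt (r : List Int) (c m : Int) :
    (r.foldl checkStepF (c, m)).1 = c + cnt m r := by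
  induction r generalizing c m with
  | nil => simp [cnt]
  | cons v r ih =>
    by_cases h : m < v
    · simp [List.foldl, checkStepF, h, cnt, max_eq_right h.le, ih (c + 1) v]; ring
    · simp [List.foldl, checkStepF, not_lt.mp h, h, cnt, max_eq_left (not_lt.mp h), ih c m]

-- cnt equals B's pairwise count over the suffix r of pre ++ r
theorem cnt_eq_countP (r : List Int) (pre : List Int) (m : Int)
    (hm : ∀ w, m < w ↔ ∀ e ∈ pre, e < w) :
    cnt m r
      = ((PySem.List.enumerate r (pre.length : Int)).countP
          (fun p => (PySem.List.slice (pre ++ r) none (some p.1)).all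
            (fun e => decide (e < p.2))) : Nat) := by
  induction r generalizing pre m with
  | nil => simp [cnt, PySem.List.enumerate_nil]
  | cons v r ih =>
    rw [cnt, PySem.List.enumerate_cons, List.countP_cons]
    have hslice : PySem.List.slice (pre ++ v :: r) none (some (pre.length : Int))
        = pre := by
      rw [PySem.List.slice_to_natCast (pre ++ v :: r) pre.length]
      exact List.take_left
    have hfirst : ((PySem.List.slice (pre ++ v :: r) none (some (pre.length : Int))).all
        (fun e => decide (e < v)) : Bool) = decide (m < v) := by
      rw [hslice]
      by_cases h : m < v
      · simp only [h, decide_true, List.all_eq_true, decide_eq_true_eq]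
        intro e he; exact (hm v).mp h e he
      · simp only [h, decide_false, List.all_eq_false]
        by_contra hc
        push_neg at hc
        exact h ((hm v).mpr (by intro e he; simpa using hc e he))
    have hpre' : ∀ w, max m v < w ↔ ∀ e ∈ pre ++ [v], e < w := by
      intro w
      rw [max_lt_iff, hm w]
      constructor
      · rintro ⟨h1, h2⟩ e he
        rcases List.mem_append.mp he with h | h
        · exact h1 e h
        · simp at h; subst h; exact h2
      · intro hall
        exact ⟨fun e he => hall e (List.mem_append.mpr (Or.inl he)), hall v (by simp)⟩
    have hrec := ih (pre ++ [v]) (max m v) hpre'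
    have hlen : ((pre ++ [v]).length : Int) = (pre.length : Int) + 1 := by
      simp
    rw [hlen] at hrec
    have happ : (pre ++ [v]) ++ r = pre ++ v :: r := by simp
    rw [happ] at hrec
    rw [hrec, hfirst]
    by_cases h : m < v <;> simp [h] <;> push_cast <;> ring

-- 1 + cnt over the tail = B's count over the whole list
theorem records_full (x : Int) (r : List Int) :
    1 + cnt x r
      = ((PySem.List.enumerate (x :: r) 0).countP
          (fun p => (PySem.List.slice (x :: r) none (some p.1)).all
            (fun e => decide (e < p.2))) : Nat) := by
  rw [PySem.List.enumerate_cons, List.countP_cons]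
  have h0 : PySem.List.slice (x :: r) none (some (0 : Int)) = [] := by
    rw [PySem.List.slice_to (x :: r) (le_refl 0)]; simp
  have hx : cnt x r
      = ((PySem.List.enumerate r 1).countP
          (fun p => (PySem.List.slice (x :: r) none (some p.1)).all
            (fun e => decide (e < p.2))) : Nat) := by
    have := cnt_eq_countP r [x] x (by intro w; simp)
    simpa using this
  rw [hx, h0]
  simp [add_comm]

-- cnt on an explicit 7-element list, as A's unfolded fold vs B's normalized count
theorem side7 (x0 x1 x2 x3 x4 x5 x6 : Int) :
    (checkStepF (checkStepF (checkStepF (checkStepF (checkStepF (checkStepF (1, x0) x1) x2) x3) x4) x5) x6).1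
      = ((List.countP
          (fun p => (PySem.List.slice [x0, x1, x2, x3, x4, x5, x6] none (some p.1)).all
            (fun e => decide (e < p.2)))
          [((0 : Int), x0), (1, x1), (2, x2), (3, x3), (4, x4), (5, x5), (6, x6)] : Nat) : Int) := by
  have h1 : (checkStepF (checkStepF (checkStepF (checkStepF (checkStepF (checkStepF (1, x0) x1) x2) x3) x4) x5) x6).1
      = ([x1, x2, x3, x4, x5, x6].foldl checkStepF (1, x0)).1 := by
    simp [List.foldl]
  rw [h1, foldl_cnt, records_full]
  norm_num [PySem.List.enumerate_cons, PySem.List.enumerate_nil]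

-- ===== VERDICT (by name: the statement is the Claim_ definition above) =====
theorem check_spec : Claim_equal_check := by
  intro vector start final _ _
  unfold Spec_check check check_alt
  simp only [show PySem.List.pyRange 1 7 1 = [1, 2, 3, 4, 5, 6] from by decide,
    show PySem.List.pyRange 0 7 1 = [0, 1, 2, 3, 4, 5, 6] from by decide,
    foldl_pair_split, List.map]
  norm_num
  rw [side7, side7]
  set a := ((List.countP _ _ : Nat) : Int) with ha
  set b := ((List.countP _ _ : Nat) : Int) with hb
  by_cases h1 : start = 0 <;> by_cases h2 : a = start <;>
    by_cases h3 : final = 0 <;> by_cases h4 : b = final <;>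
      simp [h1, h2, h3, h4]
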